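-- pv_equiv track=rewrite | github.com/YANGSEOKWOO/Algorithm | 백준/Silver/3085. 사탕 게임/사탕 게임.py | max_run_in_row
-- ===== SOURCE A (Python) =====
-- def max_run_in_row(board, r):
--     n = len(board)
--     cnt = 1
--     best = 1
--     for c in range(1, n):
--         if board[r][c] == board[r][c-1]:
--             cnt += 1
--         else:
--             cnt = 1
--         if cnt > best:
--             best = cnt
--     return best
-- ===== SOURCE B (Python) =====
-- def max_run_in_row(board, r):
--     n = len(board)
--     if n <= 1:
--         return 1
--     row = board[r][:n]
--     m = len(row)
--     best = 1
--     i = 0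
--     while i < m:
--         j = i + 1
--         while j < m and row[j] == row[i]:
--             j += 1
--         best = max(best, j - i)
--         i = j
--     return best
-- ===== Notes on version B (the rewrite author's own statement) =====
-- stated objective: alternative
-- what changed: Replaces the running-counter-with-reset index loop by an explicit run segmentation: a two-pointer scan that finds each maximal run's end and folds max over the run lengths.
import Mathlib
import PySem

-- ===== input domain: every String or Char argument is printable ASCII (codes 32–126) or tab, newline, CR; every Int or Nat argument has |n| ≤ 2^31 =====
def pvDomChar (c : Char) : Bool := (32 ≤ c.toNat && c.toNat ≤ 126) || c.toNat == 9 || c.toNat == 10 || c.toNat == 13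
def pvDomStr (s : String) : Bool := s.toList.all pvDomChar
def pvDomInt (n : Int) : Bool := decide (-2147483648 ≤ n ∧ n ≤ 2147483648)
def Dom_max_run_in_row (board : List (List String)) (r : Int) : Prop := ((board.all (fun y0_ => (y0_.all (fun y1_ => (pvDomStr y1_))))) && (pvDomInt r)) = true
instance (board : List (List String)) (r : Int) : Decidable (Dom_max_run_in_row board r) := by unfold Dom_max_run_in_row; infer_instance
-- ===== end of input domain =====

-- B replaces A's running-counter pass by an explicit run segmentation (two-pointer scan over maximal runs); same O(n) cost.

-- ===== PORT A =====
-- Literal port of A: n = len(board); row lookups board[r][c] via pyGetD (exact under Pre_, where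
-- every index A touches is in range); loop over range(1, n) carrying (cnt, best).
def max_run_in_row (board : List (List String)) (r : Int) : Int :=
  let n : Int := (board.length : Int)
  let row : List String := (PySem.List.pyGet? board r).getD []
  ((PySem.List.pyRange 1 n 1).foldl
    (fun (st : Int × Int) c =>
      let cnt := if PySem.List.pyGetD row c "" = PySem.List.pyGetD row (c - 1) "" then st.1 + 1 else 1
      let best := if cnt > st.2 then cnt else st.2
      (cnt, best)) (1, 1)).2

-- ===== PORT B =====
-- Inner while of B: starting after the run head x, count the leading elements equal to x and
-- return (that count, the remaining list after the run).
def takeRun (x : String) : List String → Nat × List String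
  | [] => (0, [])
  | y :: ys => if y = x then ((takeRun x ys).1 + 1, (takeRun x ys).2) else (0, y :: ys)

theorem takeRun_length_le (x : String) : ∀ ys : List String, (takeRun x ys).2.length ≤ ys.length := by
  intro ys
  induction ys with
  | nil => simp [takeRun]
  | cons y ys ih =>
    by_cases h : y = x <;> simp [takeRun, h]
    omega

-- Outer while of B: fold max over the run lengths.
def bLoop (best : Int) : List String → Int
  | [] => best
  | x :: xs => bLoop (max best (((takeRun x xs).1 : Int) + 1)) (takeRun x xs).2
termination_by l => l.length
decreasing_by
  have := takeRun_length_le x xs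
  simp
  omega

-- Port of B: guard n <= 1, slice board[r][:n] (pyGet? getD is exact under Pre_), then segment.
def max_run_in_row_alt (board : List (List String)) (r : Int) : Int :=
  if board.length ≤ 1 then 1
  else
    let row := PySem.List.slice ((PySem.List.pyGet? board r).getD []) none (some (board.length : Int))
    bLoop 1 row

-- ===== PRECONDITION & SPEC =====
-- Pre_ is exactly where A returns: either len(board) <= 1 (the loop body never runs), or r is a
-- valid Python index into board and row board[r] has at least len(board) entries (A reads
-- board[r][c] for c < len(board)).
def Pre_max_run_in_row (board : List (List String)) (r : Int) : Prop :=
  board.length ≤ 1 ∨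
    (PySem.Raise.InRange board.length r ∧
      board.length ≤ ((PySem.List.pyGet? board r).getD []).length)
instance (board : List (List String)) (r : Int) : Decidable (Pre_max_run_in_row board r) := by
  unfold Pre_max_run_in_row; infer_instance

def pvWitness_max_run_in_row : List (List String) × Int := ([["a", "b"], ["b", "b"]], 0)

def Spec_max_run_in_row (board : List (List String)) (r : Int) (out : Int) : Prop := out = max_run_in_row_alt board r
instance (board : List (List String)) (r : Int) (out : Int) : Decidable (Spec_max_run_in_row board r out) := by unfold Spec_max_run_in_row; infer_instance

-- ===== CLAIM (what is proved, stated in full; the proofs are below) =====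
def Claim_equal_max_run_in_row : Prop := ∀ (board : List (List String)) (r : Int), Dom_max_run_in_row board r → Pre_max_run_in_row board r → Spec_max_run_in_row board r (max_run_in_row board r)

-- ===== LEMMAS AND PROOFS =====

-- A's loop, written structurally over the remaining suffix of the row (prev = previous element).
def aloop (prev : String) (cnt best : Int) : List String → Int
  | [] => best
  | y :: ys =>
    let c' := if y = prev then cnt + 1 else 1
    aloop y c' (max best c') ys

theorem aloop_eq_bLoop : ∀ (ys : List String) (prev : String) (cnt best : Int),
    1 ≤ cnt → cnt ≤ best →
    aloop prev cnt best ys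
      = bLoop (max best (cnt + ((takeRun prev ys).1 : Int))) (takeRun prev ys).2 := by
  intro ys
  induction ys with
  | nil =>
    intro prev cnt best h1 h2
    simp [aloop, takeRun, bLoop]
    omega
  | cons y ys ih =>
    intro prev cnt best h1 h2
    by_cases h : y = prev
    · subst h
      simp [aloop, takeRun]
      rw [ih y (cnt + 1) (max best (cnt + 1)) (by omega) (by omega)]
      congr 1
      omega
    · simp only [aloop, takeRun, if_neg h]
      rw [ih y 1 (max best 1) (by omega) (by omega)]
      have hb : max best (1 : Int) = best := by omega
      rw [hb]
      have hc : max best (cnt + (((0 : Nat)) : Int)) = best := by push_cast; omega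
      rw [hc]
      conv_rhs => rw [bLoop]
      congr 1
      omega

theorem foldl_aloop (s : List String) :
    ∀ (rest : List String) (i : Nat) (prev : String) (cnt best : Int),
    s.drop i = prev :: rest →
    ((PySem.List.pyRange ((i : Int) + 1) (s.length : Int) 1).foldl
      (fun (st : Int × Int) c =>
        let cnt := if PySem.List.pyGetD s c "" = PySem.List.pyGetD s (c - 1) "" then st.1 + 1 else 1
        let best := if cnt > st.2 then cnt else st.2
        (cnt, best)) (cnt, best)).2 = aloop prev cnt best rest := by
  intro rest
  induction rest with
  | nil =>
    intro i prev cnt best hdrop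
    have hlen : s.length = i + 1 := by
      have := congrArg List.length hdrop
      simp at this
      omega
    rw [PySem.List.pyRange_one_eq_nil (by omega)]
    simp [aloop]
  | cons y rest ih =>
    intro i prev cnt best hdrop
    have hlen : i + 2 + rest.length = s.length := by
      have := congrArg List.length hdrop
      simp at this
      omega
    have hi : s[i]? = some prev := by
      have h : (s.drop i)[0]? = s[i + 0]? := List.getElem?_drop
      rw [hdrop] at h
      simpa using h.symm
    have hi1 : s[i + 1]? = some y := by
      have h : (s.drop i)[1]? = s[i + 1]? := List.getElem?_drop
      rw [hdrop] at h
      simpa using h.symm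
    rw [PySem.List.pyRange_one_cons (by omega)]
    rw [List.foldl_cons]
    have e1 : PySem.List.pyGetD s ((i : Int) + 1) "" = y := by
      have : ((i : Int) + 1) = ((i + 1 : Nat) : Int) := by omega
      rw [this, PySem.List.pyGetD_natCast]
      simp [List.getD, hi1]
    have e0 : PySem.List.pyGetD s ((i : Int) + 1 - 1) "" = prev := by
      have : ((i : Int) + 1 - 1) = ((i : Nat) : Int) := by omega
      rw [this, PySem.List.pyGetD_natCast]
      simp [List.getD, hi]
    simp only [e1, e0]
    have hdrop' : s.drop (i + 1) = y :: rest := by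
      have : s.drop (i + 1) = (s.drop i).tail := by
        rw [← List.drop_drop]
        simp
      rw [this, hdrop]
      rfl
    have := ih (i + 1) y
      (if y = prev then cnt + 1 else 1)
      (if (if y = prev then cnt + 1 else 1) > best then (if y = prev then cnt + 1 else 1) else best)
      hdrop'
    have hcast : ((i : Int) + 1 + 1) = ((i + 1 : Nat) : Int) + 1 := by push_cast; ring
    have hgoal : aloop prev cnt best (y :: rest)
        = aloop y (if y = prev then cnt + 1 else 1)
            (if (if y = prev then cnt + 1 else 1) > best then (if y = prev then cnt + 1 else 1) else best)
            rest := by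
      simp only [aloop]
      congr 1
      by_cases h : y = prev <;> simp [h] <;> omega
    rw [hcast, hgoal]
    exact this

-- lookups in the first n entries of row equal lookups in (row.take n)
theorem pyGetD_take (row : List String) (n : Nat) (c : Int) (h0 : 0 ≤ c) (hc : c < (n : Int)) :
    PySem.List.pyGetD (row.take n) c "" = PySem.List.pyGetD row c "" := by
  obtain ⟨k, rfl⟩ : ∃ k : Nat, c = (k : Int) := ⟨c.toNat, by omega⟩
  rw [PySem.List.pyGetD_natCast, PySem.List.pyGetD_natCast]
  have hk : k < n := by exact_mod_cast hc
  simp [List.getD, hk]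

theorem portA_eq_bLoop (s : List String) (hs1 : 1 ≤ s.length) :
    ((PySem.List.pyRange 1 (s.length : Int) 1).foldl
      (fun (st : Int × Int) c =>
        let cnt := if PySem.List.pyGetD s c "" = PySem.List.pyGetD s (c - 1) "" then st.1 + 1 else 1
        let best := if cnt > st.2 then cnt else st.2
        (cnt, best)) (1, 1)).2 = bLoop 1 s := by
  obtain ⟨a, t, rfl⟩ : ∃ a t, s = a :: t := by
    cases s with
    | nil => simp at hs1
    | cons a t => exact ⟨a, t, rfl⟩
  have hbridge := foldl_aloop (a :: t) t 0 a 1 1 (by simp)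
  have h01 : ((0 : Nat) : Int) + 1 = (1 : Int) := by norm_num
  rw [h01] at hbridge
  rw [hbridge, aloop_eq_bLoop t a 1 1 (le_refl 1) (le_refl 1)]
  conv_rhs => rw [bLoop]
  congr 1
  omega

theorem max_run_spec_main (board : List (List String)) (r : Int)
    (hpre : Pre_max_run_in_row board r) :
    max_run_in_row board r = max_run_in_row_alt board r := by
  by_cases hn : board.length ≤ 1
  · have hnil : PySem.List.pyRange 1 ((board.length : Nat) : Int) 1 = [] :=
      PySem.List.pyRange_one_eq_nil (by exact_mod_cast hn)
    simp only [max_run_in_row, max_run_in_row_alt, hnil, if_pos hn]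
    simp
  · have h2 : 2 ≤ board.length := by omega
    rcases hpre with h | ⟨hin, hrow⟩
    · omega
    have hslen : (((PySem.List.pyGet? board r).getD []).take board.length).length = board.length := by
      rw [List.length_take]; omega
    -- A side: replace lookups in board[r] by lookups in its first-n-prefix, then use the bridge
    have hA : max_run_in_row board r =
        ((PySem.List.pyRange 1 ((((PySem.List.pyGet? board r).getD []).take board.length).length : Int) 1).foldl
          (fun (st : Int × Int) c =>
            let cnt := if PySem.List.pyGetD (((PySem.List.pyGet? board r).getD []).take board.length) c ""
                = PySem.List.pyGetD (((PySem.List.pyGet? board r).getD []).take board.length) (c - 1) "" then st.1 + 1 else 1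
            let best := if cnt > st.2 then cnt else st.2
            (cnt, best)) (1, 1)).2 := by
      simp only [max_run_in_row]
      rw [hslen]
      congr 1
      apply PySem.List.foldl_congr_mem
      intro st c hc
      rw [PySem.List.mem_pyRange_one] at hc
      rw [pyGetD_take _ board.length c (by omega) (by exact_mod_cast hc.2),
          pyGetD_take _ board.length (c - 1) (by omega) (by exact_mod_cast by omega)]
    -- B side: the slice board[r][:n] is that same prefix
    have hB : max_run_in_row_alt board r
        = bLoop 1 (((PySem.List.pyGet? board r).getD []).take board.length) := by
      simp only [max_run_in_row_alt, if_neg hn]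
      rw [PySem.List.slice_to_natCast]
    rw [hA, hB]
    exact portA_eq_bLoop _ (by omega)

-- ===== VERDICT (by name: the statement is the Claim_ definition above) =====
theorem max_run_in_row_spec : Claim_equal_max_run_in_row := by
  intro board r _ hpre
  unfold Spec_max_run_in_row
  exact max_run_spec_main board r hpre
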